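-- pv_equiv track=rewrite | github.com/smzuluaga/myPythonCode | exercises/exercise09.py | sum_of_sums
-- ===== SOURCE A (Python) =====
-- def sum_of_sums(n):
--     suma = 0
--     suma1 = 0
--     array =[]
--
--     for i in range (1,n+1):
--         suma+= i
--         array.append(suma)
--
--     for j in array:
--         if j == array[-1]:
--             continue
--         else:
--             suma += j
--
--     for k in range (1,suma+1):
--         suma1+=k
--
--     return suma1
-- ===== SOURCE B (Python) =====
-- def sum_of_sums(n):
--     if n < 1:
--         return 0
--     s = n * (n + 1) * (n + 2) // 6
--     return s * (s + 1) // 2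
-- ===== Notes on version B (the rewrite author's own statement) =====
-- stated objective: faster
-- what changed: Replaces the three loops (building prefix sums, re-summing all but the last, then summing one up to S) by the closed-form tetrahedral number S and the triangular number of S.
import Mathlib
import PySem

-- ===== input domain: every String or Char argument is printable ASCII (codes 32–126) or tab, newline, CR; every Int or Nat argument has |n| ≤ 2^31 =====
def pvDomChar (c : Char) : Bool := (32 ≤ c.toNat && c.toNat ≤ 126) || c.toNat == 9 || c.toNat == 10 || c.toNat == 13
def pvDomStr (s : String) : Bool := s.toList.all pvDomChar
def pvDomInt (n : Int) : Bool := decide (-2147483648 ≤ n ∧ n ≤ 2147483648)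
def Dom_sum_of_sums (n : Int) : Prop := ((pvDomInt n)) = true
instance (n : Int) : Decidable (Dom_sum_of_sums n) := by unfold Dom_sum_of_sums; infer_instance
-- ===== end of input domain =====

-- B replaces A's three loops by the closed forms S = n(n+1)(n+2)/6 and S(S+1)/2 (faster).

-- ===== PORT A =====
def sum_of_sums (n : Int) : Int :=
  -- suma, array built by the first loop
  let st := (PySem.List.pyRange 1 (n + 1) 1).foldl
      (fun (p : Int × List Int) i => (p.1 + i, p.2 ++ [p.1 + i])) (0, [])
  -- second loop: 'if j == array[-1]: continue else: suma += j'
  let suma := st.2.foldl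
      (fun s j => if some j = PySem.List.pyGet? st.2 (-1) then s else s + j) st.1
  -- third loop: suma1
  (PySem.List.pyRange 1 (suma + 1) 1).foldl (fun s1 k => s1 + k) 0

-- ===== PORT B =====
def sum_of_sums_alt (n : Int) : Int :=
  if n < 1 then 0
  else
    let s := PySem.Int.floordiv (n * (n + 1) * (n + 2)) 6
    PySem.Int.floordiv (s * (s + 1)) 2

-- ===== PRECONDITION & SPEC =====
def Spec_sum_of_sums (n : Int) (out : Int) : Prop := out = sum_of_sums_alt n
instance (n : Int) (out : Int) : Decidable (Spec_sum_of_sums n out) := by unfold Spec_sum_of_sums; infer_instance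

-- ===== CLAIM (what is proved, stated in full; the proofs are below) =====
def Claim_equal_sum_of_sums : Prop := ∀ (n : Int), Dom_sum_of_sums n → Spec_sum_of_sums n (sum_of_sums n)

-- ===== LEMMAS AND PROOFS =====

-- triangular and tetrahedral numbers, recursively (the values A's loops accumulate)
def pvTri : Nat → Int
  | 0 => 0
  | k + 1 => pvTri k + ((k : Int) + 1)

def pvTet : Nat → Int
  | 0 => 0
  | k + 1 => pvTet k + pvTri (k + 1)

theorem pvTri_nonneg (m : Nat) : 0 ≤ pvTri m := by
  induction m with
  | zero => simp [pvTri]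
  | succ k ih => simp only [pvTri]; positivity

theorem pvTet_nonneg (m : Nat) : 0 ≤ pvTet m := by
  induction m with
  | zero => simp [pvTet]
  | succ k ih => have := pvTri_nonneg (k + 1); simp only [pvTet]; omega

theorem pvTri_lt (a b : Nat) (h : a < b) : pvTri a < pvTri b := by
  induction b with
  | zero => omega
  | succ c ih =>
    have hstep : pvTri c < pvTri (c + 1) := by
      simp only [pvTri]; have : (0:Int) < (c:Int) + 1 := by positivity
      omega
    rcases Nat.lt_succ_iff_lt_or_eq.mp h with h' | h'
    · exact lt_trans (ih h') hstep
    · subst h'; exact hstep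

theorem pvTri_closed (m : Nat) : 2 * pvTri m = (m : Int) * ((m : Int) + 1) := by
  induction m with
  | zero => simp [pvTri]
  | succ k ih => simp only [pvTri]; push_cast; linear_combination ih

theorem pvTet_closed (m : Nat) :
    6 * pvTet m = (m : Int) * ((m : Int) + 1) * ((m : Int) + 2) := by
  induction m with
  | zero => simp [pvTet]
  | succ k ih =>
    have h := pvTri_closed (k + 1)
    simp only [pvTet]; push_cast at h ⊢; linear_combination ih + 3 * h

-- the first loop: accumulator = tri m, array = [tri 1, …, tri m]
theorem pv_loop1 (m : Nat) :
    (PySem.List.pyRange 1 ((m : Int) + 1) 1).foldl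
        (fun (p : Int × List Int) i => (p.1 + i, p.2 ++ [p.1 + i])) (0, [])
      = (pvTri m, (List.range m).map (fun k => pvTri (k + 1))) := by
  induction m with
  | zero => simp [PySem.List.pyRange_one_eq_nil, pvTri]
  | succ k ih =>
    have hsplit : PySem.List.pyRange 1 (((k + 1 : Nat) : Int) + 1) 1
        = PySem.List.pyRange 1 ((k : Int) + 1) 1 ++ [(k : Int) + 1] := by
      push_cast
      exact PySem.List.pyRange_one_succ_right (by omega)
    rw [hsplit, List.foldl_append, ih]
    simp [List.range_succ, pvTri]

-- sum of the first k triangular numbers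
theorem pv_sum_tri (k : Nat) :
    ((List.range k).map (fun i => pvTri (i + 1))).sum = pvTet k := by
  induction k with
  | zero => simp [pvTet]
  | succ c ih => simp [List.range_succ, ih, pvTet]

-- the third loop: sum of 1..s
theorem pv_loop3 (s : Nat) :
    (PySem.List.pyRange 1 ((s : Int) + 1) 1).foldl (fun s1 k => s1 + k) 0 = pvTri s := by
  induction s with
  | zero => simp [PySem.List.pyRange_one_eq_nil, pvTri]
  | succ c ih =>
    have hsplit : PySem.List.pyRange 1 (((c + 1 : Nat) : Int) + 1) 1
        = PySem.List.pyRange 1 ((c : Int) + 1) 1 ++ [(c : Int) + 1] := by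
      push_cast
      exact PySem.List.pyRange_one_succ_right (by omega)
    rw [hsplit, List.foldl_append, ih]
    simp [pvTri]

-- the second loop on array = [tri 1, …, tri m] starting from tri m gives tet m
theorem pv_loop2 (c : Nat) :
    ((List.range (c + 1)).map (fun k => pvTri (k + 1))).foldl
        (fun s j => if some j = PySem.List.pyGet?
            ((List.range (c + 1)).map (fun k => pvTri (k + 1))) (-1) then s else s + j)
        (pvTri (c + 1))
      = pvTet (c + 1) := by
  have harr : (List.range (c + 1)).map (fun k => pvTri (k + 1))
      = (List.range c).map (fun k => pvTri (k + 1)) ++ [pvTri (c + 1)] := by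
    simp [List.range_succ]
  have hlast : PySem.List.pyGet?
      ((List.range (c + 1)).map (fun k => pvTri (k + 1))) (-1) = some (pvTri (c + 1)) := by
    rw [harr]; exact PySem.List.pyGet?_neg_one_append_singleton _ _
  rw [hlast, harr, List.foldl_append]
  have hleft : ((List.range c).map (fun k => pvTri (k + 1))).foldl
      (fun s j => if some j = some (pvTri (c + 1)) then s else s + j) (pvTri (c + 1))
      = pvTri (c + 1) + ((List.range c).map (fun k => pvTri (k + 1))).sum := by
    rw [PySem.List.foldl_congr_mem _ _
      (fun (s : Int) (j : Int) => s + j) _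
      (by
        intro acc x hx
        rcases List.mem_map.mp hx with ⟨k, hk, rfl⟩
        have : pvTri (k + 1) < pvTri (c + 1) := pvTri_lt _ _ (Nat.succ_lt_succ (List.mem_range.mp hk))
        have hne : pvTri (k + 1) ≠ pvTri (c + 1) := ne_of_lt this
        simp [hne])]
    simpa using PySem.List.foldl_add ((List.range c).map (fun k => pvTri (k + 1)))
      (fun (x : Int) => x) (pvTri (c + 1))
  rw [hleft]
  simp only [List.foldl_cons, List.foldl_nil, if_pos, pv_sum_tri]
  have : pvTet (c + 1) = pvTet c + pvTri (c + 1) := rfl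
  omega

-- floordiv cancels an exact multiple
theorem pv_fdiv_exact (t b : Int) (hb : 0 < b) : PySem.Int.floordiv (b * t) b = t := by
  rw [PySem.Int.floordiv_eq_ediv_of_pos hb]
  exact Int.mul_ediv_cancel_left t (by omega)

-- ===== VERDICT (by name: the statement is the Claim_ definition above) =====
theorem sum_of_sums_spec : Claim_equal_sum_of_sums := by
  intro n _
  unfold Spec_sum_of_sums sum_of_sums sum_of_sums_alt
  by_cases hn : n < 1
  · have h1 : PySem.List.pyRange 1 (n + 1) 1 = [] :=
      PySem.List.pyRange_one_eq_nil (by omega)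
    simp [h1, hn]
  · -- n ≥ 1 : write n = ↑m with m = c + 1
    rw [not_lt] at hn
    obtain ⟨m, rfl⟩ : ∃ m : Nat, n = (m : Int) := ⟨n.toNat, (Int.toNat_of_nonneg (by omega)).symm⟩
    obtain ⟨c, rfl⟩ : ∃ c : Nat, m = c + 1 := by
      cases m with
      | zero => simp at hn
      | succ c => exact ⟨c, rfl⟩
    simp only [pv_loop1 (c + 1)]
    rw [pv_loop2 c]
    obtain ⟨s, hs⟩ : ∃ s : Nat, pvTet (c + 1) = (s : Int) :=
      ⟨(pvTet (c + 1)).toNat, (Int.toNat_of_nonneg (pvTet_nonneg _)).symm⟩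
    rw [hs, pv_loop3 s]
    have hnot : ¬ ((c + 1 : Nat) : Int) < 1 := by push_cast; omega
    rw [if_neg hnot]
    have h6 : ((c + 1 : Nat) : Int) * (((c + 1 : Nat) : Int) + 1) * (((c + 1 : Nat) : Int) + 2)
        = 6 * pvTet (c + 1) := (pvTet_closed (c + 1)).symm
    rw [h6, pv_fdiv_exact _ _ (by norm_num), hs]
    have h2 : (s : Int) * ((s : Int) + 1) = 2 * pvTri s := (pvTri_closed s).symm
    rw [h2, pv_fdiv_exact _ _ (by norm_num)]
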